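-- pv_equiv track=rewrite | github.com/astral-sh/ruff-lsp | ruff_lsp/server.py | _get_line_endings
-- ===== SOURCE A (Python) =====
-- def _get_line_endings(text: str) -> str | None:
--     """Returns line endings used in the text."""
--     for i in range(len(text)):
--         if text[i] == "\r":
--             if i < len(text) - 1 and text[i + 1] == "\n":
--                 return "\r\n"  # CLRF
--             else:
--                 return "\r"  # CR
--         elif text[i] == "\n":
--             return "\n"  # LF
--     return None  # No line ending found
-- ===== SOURCE B (Python) =====
-- def _get_line_endings(text: str) -> str | None:
--     """Returns line endings used in the text (style of the first line break)."""
--     lines = text.splitlines(keepends=True)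
--     if not lines:
--         return None
--     first = lines[0]
--     if first.endswith("\r\n"):
--         return "\r\n"
--     if first.endswith("\r"):
--         return "\r"
--     if first.endswith("\n"):
--         return "\n"
--     return None
-- ===== Notes on version B (the rewrite author's own statement) =====
-- stated objective: idiomatic
-- what changed: B replaces A's index-by-index scan with lookahead by a staged decomposition: split the text into lines with str.splitlines(keepends=True) and classify the retained line break at the end of the first line with endswith; the C-level splitlines pass makes it measurably faster than A's Python-level per-character loop.
import Mathlib
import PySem

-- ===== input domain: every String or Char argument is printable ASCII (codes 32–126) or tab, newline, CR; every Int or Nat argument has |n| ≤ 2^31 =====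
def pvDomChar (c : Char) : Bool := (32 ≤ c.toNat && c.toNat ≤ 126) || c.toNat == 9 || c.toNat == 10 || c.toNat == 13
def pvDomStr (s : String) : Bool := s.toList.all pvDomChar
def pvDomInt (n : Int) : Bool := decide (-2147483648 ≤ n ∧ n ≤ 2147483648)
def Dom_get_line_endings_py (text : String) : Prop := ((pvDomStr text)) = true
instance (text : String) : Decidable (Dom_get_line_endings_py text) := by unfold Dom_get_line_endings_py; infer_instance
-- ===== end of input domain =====

-- B replaces A's index-scanning loop with a staged decomposition: split the text into
-- lines keeping the line breaks (str.splitlines(keepends=True)), then classify the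
-- break kept at the end of the first line with endswith; a timing run measured B
-- faster (C-level splitlines vs A's Python-level per-character loop).

-- ===== PORT A =====
-- A's loop 'for i in range(len(text))' inspects text[i] and text[i+1]; ported as
-- structural recursion on the character list, where 'rest.head?' is exactly the
-- guarded lookahead 'i < len(text) - 1 and text[i + 1] == "\n"'.
def pvScanA : List Char → Option String
  | [] => none
  | c :: rest =>
    if c = '\r' then
      (if rest.head? = some '\n' then some "\r\n" else some "\r")
    else if c = '\n' then some "\n"
    else pvScanA rest

def get_line_endings_py (text : String) : Option String := pvScanA text.toList

-- ===== PORT B =====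
-- Hand port of str.splitlines(keepends=True): exact on Dom (whose characters are
-- printable ASCII, tab, '\n', '\r'; none of Python's extra break characters
-- '\v' '\f' '\x1c'-'\x1e' '\x85' … can occur). 'acc' accumulates the current
-- line's characters in reverse.
def pvSplitKeep (acc : List Char) : List Char → List (List Char)
  | [] => if acc = [] then [] else [acc.reverse]
  | '\r' :: '\n' :: rest => (acc.reverse ++ ['\r', '\n']) :: pvSplitKeep [] rest
  | '\r' :: rest => (acc.reverse ++ ['\r']) :: pvSplitKeep [] rest
  | '\n' :: rest => (acc.reverse ++ ['\n']) :: pvSplitKeep [] rest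
  | c :: rest => pvSplitKeep (c :: acc) rest

def get_line_endings_py_alt (text : String) : Option String :=
  match (pvSplitKeep [] text.toList).head? with
  | none => none                               -- 'if not lines: return None'
  | some first =>
    if PySem.Chars.endswith first ['\r', '\n'] then some "\r\n"
    else if PySem.Chars.endswith first ['\r'] then some "\r"
    else if PySem.Chars.endswith first ['\n'] then some "\n"
    else none

-- ===== PRECONDITION & SPEC =====
def Spec_get_line_endings_py (text : String) (out : Option String) : Prop := out = get_line_endings_py_alt text
instance (text : String) (out : Option String) : Decidable (Spec_get_line_endings_py text out) := by unfold Spec_get_line_endings_py; infer_instance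

-- ===== CLAIM (what is proved, stated in full; the proofs are below) =====
def Claim_equal_get_line_endings_py : Prop := ∀ (text : String), Dom_get_line_endings_py text → Spec_get_line_endings_py text (get_line_endings_py text)

-- ===== LEMMAS AND PROOFS =====

-- B's if-chain on one line, to talk about it uniformly.
def pvClassify (o : Option (List Char)) : Option String :=
  match o with
  | none => none
  | some first =>
    if PySem.Chars.endswith first ['\r', '\n'] then some "\r\n"
    else if PySem.Chars.endswith first ['\r'] then some "\r"
    else if PySem.Chars.endswith first ['\n'] then some "\n"
    else none

-- a one-character suffix of xs ++ [a] is exactly its last character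
theorem pv_suffix_concat (d a : Char) (xs : List Char) :
    [d] <:+ xs ++ [a] ↔ a = d := by
  constructor
  · rintro ⟨t, ht⟩
    have := congrArg List.getLast? ht
    simpa using this.symm
  · rintro rfl; exact ⟨xs, rfl⟩

theorem pv_endswith_concat (d a : Char) (xs : List Char) :
    PySem.Chars.endswith (xs ++ [a]) [d] = (a == d) := by
  by_cases h : a = d
  · subst h
    simp [(PySem.Chars.endswith_iff _ _).mpr ((pv_suffix_concat a a xs).mpr rfl)]
  · have : ¬ [d] <:+ xs ++ [a] := fun hs => h ((pv_suffix_concat d a xs).mp hs)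
    have he : PySem.Chars.endswith (xs ++ [a]) [d] ≠ true := fun hh =>
      this ((PySem.Chars.endswith_iff _ _).mp hh)
    simp_all

-- a two-character suffix ['\r','\n'] requires the last char to be '\n' …
theorem pv_endswith_crlf_ne (a : Char) (ha : a ≠ '\n') (xs : List Char) :
    PySem.Chars.endswith (xs ++ [a]) ['\r', '\n'] = false := by
  by_contra h
  have h1 : PySem.Chars.endswith (xs ++ [a]) ['\r', '\n'] = true := by
    cases hb : PySem.Chars.endswith (xs ++ [a]) ['\r', '\n'] with
    | true => rfl
    | false => exact absurd hb h
  have h2 : ['\r', '\n'] <:+ xs ++ [a] := (PySem.Chars.endswith_iff _ _).mp h1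
  have h3 : ['\n'] <:+ xs ++ [a] := List.IsSuffix.trans ⟨['\r'], rfl⟩ h2
  exact ha ((pv_suffix_concat '\n' a xs).mp h3)

-- … and the char before it to be '\r'
theorem pv_endswith_crlf (xs : List Char) :
    PySem.Chars.endswith (xs ++ ['\n']) ['\r', '\n'] =
      PySem.Chars.endswith xs ['\r'] := by
  have : (['\r', '\n'] <:+ xs ++ ['\n']) ↔ (['\r'] <:+ xs) := by
    constructor
    · rintro ⟨t, ht⟩
      refine ⟨t, ?_⟩
      have : (t ++ ['\r']) ++ ['\n'] = xs ++ ['\n'] := by simpa using ht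
      exact List.append_cancel_right this
    · rintro ⟨t, ht⟩
      exact ⟨t, by simp [← ht]⟩
  by_cases h : ['\r'] <:+ xs
  · simp [(PySem.Chars.endswith_iff _ _).mpr (this.mpr h), (PySem.Chars.endswith_iff _ _).mpr h]
  · have h1 : PySem.Chars.endswith (xs ++ ['\n']) ['\r', '\n'] ≠ true := fun hh =>
      h (this.mp ((PySem.Chars.endswith_iff _ _).mp hh))
    have h2 : PySem.Chars.endswith xs ['\r'] ≠ true := fun hh =>
      h ((PySem.Chars.endswith_iff _ _).mp hh)
    simp_all

-- an accumulator holding no break characters yields a first line that classifies to none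
theorem pv_classify_acc (acc : List Char) (h : ∀ c ∈ acc, c ≠ '\r' ∧ c ≠ '\n') :
    pvClassify (some acc.reverse) = none := by
  cases acc with
  | nil => simp [pvClassify, PySem.Chars.endswith]
  | cons a as =>
    have ha := h a (by simp)
    have hrev : (a :: as).reverse = as.reverse ++ [a] := by simp
    rw [hrev]
    simp [pvClassify, pv_endswith_concat, pv_endswith_crlf_ne a ha.2, ha.1, ha.2]

-- a break-free accumulator (reversed) never ends with a given break character
theorem pv_endswith_rev (d : Char) (acc : List Char) (h : ∀ c ∈ acc, c ≠ d) :
    PySem.Chars.endswith acc.reverse [d] = false := by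
  cases acc with
  | nil =>
    have : ¬ [d] <:+ ([] : List Char) := by simp
    have h1 : PySem.Chars.endswith ([] : List Char) [d] ≠ true := fun hh =>
      this ((PySem.Chars.endswith_iff _ _).mp hh)
    simp_all
  | cons a as =>
    have ha : a ≠ d := h a (by simp)
    have : (a :: as).reverse = as.reverse ++ [a] := by simp
    rw [this, pv_endswith_concat]
    simp [ha]

-- the invariant: classifying the first kept line equals A's scan, for any break-free accumulator
theorem pv_main : ∀ (acc cs : List Char), (∀ c ∈ acc, c ≠ '\r' ∧ c ≠ '\n') →
    pvClassify ((pvSplitKeep acc cs).head?) = pvScanA cs := by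
  intro acc cs
  induction acc, cs using pvSplitKeep.induct with
  | case1 =>
    intro _; simp [pvSplitKeep, pvClassify, pvScanA]
  | case2 acc hne =>
    intro h
    simp only [pvSplitKeep, if_neg hne, List.head?]
    rw [pv_classify_acc acc h]
    simp [pvScanA]
  | case3 acc rest _ =>
    intro _
    have h1 : acc.reverse ++ ['\r', '\n'] = (acc.reverse ++ ['\r']) ++ ['\n'] := by simp
    simp only [pvSplitKeep, List.head?, pvClassify, h1, pv_endswith_crlf,
      pv_endswith_concat]
    simp [pvScanA]
  | case4 acc rest hnotn _ =>
    intro _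
    have hh : rest.head? ≠ some '\n' := by
      cases rest with
      | nil => simp
      | cons b bs =>
        intro hc
        simp only [List.head?, Option.some.injEq] at hc
        exact hnotn bs (by rw [hc])
    simp only [pvSplitKeep, List.head?, pvClassify,
      pv_endswith_crlf_ne '\r' (by decide), pv_endswith_concat]
    simp [pvScanA, hh]
  | case5 acc rest _ =>
    intro h
    have hr : ∀ c ∈ acc, c ≠ '\r' := fun c hc => (h c hc).1
    simp only [pvSplitKeep, List.head?, pvClassify, pv_endswith_crlf,
      pv_endswith_rev '\r' acc hr, pv_endswith_concat]
    simp [pvScanA]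
  | case6 acc c rest _ hcr hcn ih =>
    intro h
    have hcr' : c ≠ '\r' := fun hc => hcr hc
    have hcn' : c ≠ '\n' := fun hc => hcn hc
    have h' : ∀ d ∈ (c :: acc), d ≠ '\r' ∧ d ≠ '\n' := by
      intro d hd
      rcases List.mem_cons.mp hd with rfl | hd
      · exact ⟨hcr', hcn'⟩
      · exact h d hd
    have hstep : pvSplitKeep acc (c :: rest) = pvSplitKeep (c :: acc) rest := by
      conv_lhs => rw [pvSplitKeep.eq_def]
      simp at hcr' hcn' ⊢
    rw [hstep, ih h']
    simp [pvScanA, hcr', hcn']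

-- ===== VERDICT (by name: the statement is the Claim_ definition above) =====
theorem get_line_endings_py_spec : Claim_equal_get_line_endings_py := by
  intro text _
  unfold Spec_get_line_endings_py get_line_endings_py get_line_endings_py_alt
  have := pv_main [] text.toList (by simp)
  simpa [pvClassify] using this.symm
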